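-- pv_equiv track=rewrite | github.com/pypi-data/pypi-mirror-76 | packages/lhc-python/lhc-python-2.3.1.tar.gz/lhc-python-2.3.1/lhc/io/vcf/tools/split_alt.py | _split_samples
-- ===== SOURCE A (Python) =====
-- def _split_samples(samples, n):
--     if len(samples) == 0:
--         return n * [{}]
--     split = []
--     for sample in samples.values():
--         split.append(_split_dict(sample, n))
--     res = []
--     for sample_data in zip(*split):
--         res.append(dict(list(zip(samples, sample_data))))
--     return res
--
-- def _split_dict(info, n):
--     res = [info.copy() for i in range(n)]
--     for key, value in info.items():
--         if ',' not in value: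
--             continue
--         for r, v in zip(res, value.split(',')):
--             r[key] = v
--     return res
-- ===== SOURCE B (Python) =====
-- def _split_samples(samples, n):
--     res = []
--     for i in range(n):
--         d = {}
--         for name, sample in samples.items():
--             copy = sample.copy()
--             for key, value in sample.items():
--                 parts = value.split(',')
--                 if ',' in value and i < len(parts):
--                     copy[key] = parts[i]
--             d[name] = copy
--         res.append(d)
--     return res
-- ===== Notes on version B (the rewrite author's own statement) =====
-- stated objective: simpler
-- what changed: B builds each of the n output dicts directly in a single outer loop over copy index i, eliminating the _split_dict helper, the intermediate per-sample split lists and the zip(*split) transpose; the empty-samples special case disappears because the loop yields n empty dicts naturally.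
import Mathlib
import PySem

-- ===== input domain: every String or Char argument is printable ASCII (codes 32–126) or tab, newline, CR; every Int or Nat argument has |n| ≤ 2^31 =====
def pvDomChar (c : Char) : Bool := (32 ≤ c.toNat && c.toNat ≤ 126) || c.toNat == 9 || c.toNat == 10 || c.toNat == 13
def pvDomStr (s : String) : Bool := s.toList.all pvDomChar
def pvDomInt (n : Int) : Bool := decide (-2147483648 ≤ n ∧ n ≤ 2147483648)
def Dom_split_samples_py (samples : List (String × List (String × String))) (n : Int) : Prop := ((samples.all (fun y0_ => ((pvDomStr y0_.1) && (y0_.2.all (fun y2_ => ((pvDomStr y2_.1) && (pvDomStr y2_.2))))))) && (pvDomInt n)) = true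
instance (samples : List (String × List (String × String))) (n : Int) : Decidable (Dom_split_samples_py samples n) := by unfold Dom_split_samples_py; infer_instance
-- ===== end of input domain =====

-- B builds each of the n output dicts directly by copy index, dropping the _split_dict
-- helper, the intermediate split lists and the zip(*split) transpose (objective: simpler).

-- ===== PORT A =====
-- d[k] = v on an assoc-list dict: overwrite at the first occurrence keeping its
-- position, append if absent — exact Python dict-assignment semantics.
def pvSetKey (d : List (String × String)) (k v : String) : List (String × String) :=
  match d with
  | [] => [(k, v)]
  | (k', v') :: t => if k' == k then (k, v) :: t else (k', v') :: pvSetKey t k v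

-- 'for r, v in zip(res, value.split(',')): r[key] = v' — stops at the shorter list,
-- remaining dicts untouched (exact zip semantics).
def pvZipSet (res : List (List (String × String))) (k : String) (parts : List String) : List (List (String × String)) :=
  match res, parts with
  | r :: rs, p :: ps => pvSetKey r k p :: pvZipSet rs k ps
  | rs, [] => rs
  | [], _ => []

def split_dict_py (info : List (String × String)) (n : Int) : List (List (String × String)) :=
  info.foldl
    (fun res kv =>
      if PySem.Str.isIn "," kv.2 then pvZipSet res kv.1 ((PySem.Str.split? kv.2 ",").getD []) else res)
    (List.replicate n.toNat info)   -- [info.copy() for i in range(n)]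

-- heads of all rows; none as soon as one row is exhausted (one step of zip(*rows))
def pvHeads {α : Type} : List (List α) → Option (List α)
  | [] => some []
  | r :: rs => match r with
    | [] => none
    | h :: _ => (pvHeads rs).map (h :: ·)

-- zip(*rows), hand port of the builtin (exact: stops at the first exhausted row);
-- the first row loses one element per step, so its length bounds the iterations.
def pvZipStarAux {α : Type} (fuel : Nat) (rows : List (List α)) : List (List α) :=
  match fuel with
  | 0 => []
  | f + 1 =>
    match pvHeads rows with
    | none => []
    | some hs => hs :: pvZipStarAux f (rows.map List.tail)

def pvZipStar {α : Type} (rows : List (List α)) : List (List α) :=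
  match rows with
  | [] => []
  | r :: _ => pvZipStarAux r.length rows

def split_samples_py (samples : List (String × List (String × String))) (n : Int) : List (List (String × List (String × String))) :=
  if samples.length = 0 then
    List.replicate n.toNat []   -- n * [{}]
  else
    let split := samples.foldl (fun acc s => acc ++ [split_dict_py s.2 n]) []
    (pvZipStar split).foldl
      (fun res col => res ++ [(samples.map (·.1)).zip col]) []

-- ===== PORT B =====
def split_samples_py_alt (samples : List (String × List (String × String))) (n : Int) : List (List (String × List (String × String))) :=
  (PySem.List.pyRange 0 n 1).foldl
    (fun res i =>
      res ++ [samples.foldl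
        (fun d nmS =>
          d ++ [(nmS.1,
            nmS.2.foldl
              (fun copy kv =>
                let parts := (PySem.Str.split? kv.2 ",").getD []
                if PySem.Str.isIn "," kv.2 ∧ i < (parts.length : Int) then
                  pvSetKey copy kv.1 ((PySem.List.pyGet? parts i).getD kv.2)
                else copy)
              nmS.2)])
        []])
    []

-- ===== PRECONDITION & SPEC =====
def Spec_split_samples_py (samples : List (String × List (String × String))) (n : Int) (out : List (List (String × List (String × String)))) : Prop := out = split_samples_py_alt samples n
instance (samples : List (String × List (String × String))) (n : Int) (out : List (List (String × List (String × String)))) : Decidable (Spec_split_samples_py samples n out) := by unfold Spec_split_samples_py; infer_instance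

-- ===== CLAIM (what is proved, stated in full; the proofs are below) =====
def Claim_equal_split_samples_py : Prop := ∀ (samples : List (String × List (String × String))) (n : Int), Dom_split_samples_py samples n → Spec_split_samples_py samples n (split_samples_py samples n)

-- ===== LEMMAS AND PROOFS =====

-- B's inner per-copy transformation, indexed by a natural copy index
def pvMod (i : Nat) (info : List (String × String)) : List (String × String) :=
  info.foldl
    (fun copy kv =>
      let parts := (PySem.Str.split? kv.2 ",").getD []
      if PySem.Str.isIn "," kv.2 ∧ i < parts.length then
        pvSetKey copy kv.1 (parts[i]?.getD kv.2)
      else copy)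
    info

lemma pv_map_range_const {α : Type} (m : Nat) (a : α) :
    (List.range m).map (fun _ => a) = List.replicate m a := by
  induction m with
  | zero => rfl
  | succ m ih => rw [List.range_succ, List.map_append, ih]; simp [List.replicate_succ']

lemma pv_zipSet_nil (res : List (List (String × String))) (k : String) :
    pvZipSet res k [] = res := by
  cases res <;> rfl

lemma pv_zipSet_range (k : String) (d0 : String) :
    ∀ (parts : List String) (m : Nat) (f : Nat → List (String × String)),
      pvZipSet ((List.range m).map f) k parts =
        (List.range m).map (fun i =>
          if i < parts.length then pvSetKey (f i) k (parts[i]?.getD d0) else f i) := by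
  intro parts
  induction parts with
  | nil => intro m f; simp [pv_zipSet_nil]
  | cons p ps ih =>
    intro m f
    cases m with
    | zero => simp [pvZipSet]
    | succ m =>
      rw [List.range_succ_eq_map]
      simp only [List.map_cons, List.map_map, pvZipSet, Function.comp_def]
      rw [ih m (fun i => f (i + 1))]
      simp

-- A's per-item fold over a range-shaped result list acts index-wise like B's step
lemma pv_foldA_range :
    ∀ (items : List (String × String)) (m : Nat) (f : Nat → List (String × String)),
      items.foldl
        (fun res kv =>
          if PySem.Str.isIn "," kv.2 then pvZipSet res kv.1 ((PySem.Str.split? kv.2 ",").getD []) else res)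
        ((List.range m).map f) =
      (List.range m).map (fun i =>
        items.foldl
          (fun copy kv =>
            let parts := (PySem.Str.split? kv.2 ",").getD []
            if PySem.Str.isIn "," kv.2 ∧ i < parts.length then
              pvSetKey copy kv.1 (parts[i]?.getD kv.2)
            else copy)
          (f i)) := by
  intro items
  induction items with
  | nil => intro m f; simp
  | cons kv t ih =>
    intro m f
    simp only [List.foldl_cons]
    by_cases h : PySem.Str.isIn "," kv.2 = true
    · rw [if_pos h, pv_zipSet_range kv.1 kv.2 ((PySem.Str.split? kv.2 ",").getD []) m f, ih]
      apply List.map_congr_left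
      intro i _
      congr 1
      simp only [h, true_and]
    · rw [if_neg h, ih]
      apply List.map_congr_left
      intro i _
      congr 1
      exact (if_neg (fun hc => h hc.1)).symm

lemma pv_split_dict_eq (info : List (String × String)) (n : Int) :
    split_dict_py info n = (List.range n.toNat).map (fun i => pvMod i info) := by
  unfold split_dict_py pvMod
  rw [← pv_map_range_const n.toNat info, pv_foldA_range]

lemma pv_heads_some {α σ : Type} (a : σ → α) (t : σ → List α) :
    ∀ (l : List σ), pvHeads (l.map (fun s => a s :: t s)) = some (l.map a) := by
  intro l
  induction l with
  | nil => rfl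
  | cons x xs ih => simp [pvHeads, ih]

lemma pv_zipStarAux_range {α σ : Type} :
    ∀ (m : Nat) (l : List σ) (h : σ → Nat → α),
      pvZipStarAux m (l.map (fun s => (List.range m).map (h s))) =
        (List.range m).map (fun i => l.map (fun s => h s i)) := by
  intro m
  induction m with
  | zero => intro l h; simp [pvZipStarAux]
  | succ m ih =>
    intro l h
    rw [List.range_succ_eq_map]
    simp only [List.map_cons, List.map_map, pvZipStarAux, Function.comp_def]
    rw [pv_heads_some (fun s => h s 0) (fun s => (List.range m).map (fun i => h s (i + 1)))]
    simp only [List.tail_cons]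
    rw [ih l (fun s i => h s (i + 1))]

lemma pv_zipStar_range {α σ : Type} (l : List σ) (hl : l ≠ []) (m : Nat) (h : σ → Nat → α) :
    pvZipStar (l.map (fun s => (List.range m).map (h s))) =
      (List.range m).map (fun i => l.map (fun s => h s i)) := by
  cases l with
  | nil => exact absurd rfl hl
  | cons x xs =>
    show pvZipStarAux ((List.range m).map (h x)).length _ = _
    rw [List.length_map, List.length_range]
    exact pv_zipStarAux_range m (x :: xs) h

lemma pv_zip_fst_map {α β γ : Type} (f : α × β → γ) :
    ∀ (l : List (α × β)), (l.map (·.1)).zip (l.map f) = l.map (fun s => (s.1, f s)) := by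
  intro l
  induction l with
  | nil => rfl
  | cons x xs ih => simp [ih]

-- bridge: B's Int-indexed copy equals pvMod at a natural index
lemma pv_alt_inner_eq (k : Nat) (s : List (String × String)) :
    s.foldl
      (fun copy kv =>
        if PySem.Str.isIn "," kv.2 ∧ ((0 : Int) + (k : Nat)) < (((PySem.Str.split? kv.2 ",").getD []).length : Int) then
          pvSetKey copy kv.1 ((PySem.List.pyGet? ((PySem.Str.split? kv.2 ",").getD []) ((0 : Int) + (k : Nat))).getD kv.2)
        else copy)
      s = pvMod k s := by
  unfold pvMod
  apply PySem.List.foldl_congr_mem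
  intro copy kv _
  have h0 : ((0 : Int) + (k : Nat)) = ((k : Nat) : Int) := by simp
  rw [h0]
  simp [PySem.List.pyGet?_natCast]

lemma pv_alt_eq (samples : List (String × List (String × String))) (n : Int) :
    split_samples_py_alt samples n =
      (List.range n.toNat).map (fun i =>
        samples.map (fun s => (s.1, pvMod i s.2))) := by
  unfold split_samples_py_alt
  rw [PySem.List.pyRange_one]
  simp only [PySem.List.foldl_append_singleton_eq_map, List.nil_append, List.map_map,
    Function.comp_def, sub_zero]
  apply List.map_congr_left
  intro k _
  apply List.map_congr_left
  intro x _
  congr 1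
  exact pv_alt_inner_eq k x.2

-- ===== VERDICT (by name: the statement is the Claim_ definition above) =====
theorem split_samples_py_spec : Claim_equal_split_samples_py := by
  intro samples n _
  show split_samples_py samples n = split_samples_py_alt samples n
  rw [pv_alt_eq]
  unfold split_samples_py
  by_cases he : samples.length = 0
  · rw [if_pos he]
    rw [List.length_eq_zero_iff] at he
    subst he
    simp only [List.map_nil]
    exact (pv_map_range_const n.toNat []).symm
  · rw [if_neg he]
    have hne : samples ≠ [] := by
      intro h; exact he (by simp [h])
    simp only [PySem.List.foldl_append_singleton_eq_map, List.nil_append]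
    have hrows : samples.map (fun s => split_dict_py s.2 n) =
        samples.map (fun s => (List.range n.toNat).map (fun i => pvMod i s.2)) := by
      apply List.map_congr_left; intro s _; exact pv_split_dict_eq s.2 n
    rw [hrows, pv_zipStar_range samples hne n.toNat (fun s i => pvMod i s.2)]
    simp only [List.map_map, Function.comp_def]
    apply List.map_congr_left
    intro i _
    exact pv_zip_fst_map (fun s => pvMod i s.2) samples
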